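-- pv_equiv track=rewrite | github.com/francis-auka/Data-scrapper | backend/app/services/dataset_explainer.py | _infer_column_meaning
-- ===== SOURCE A (Python) =====
-- from typing import Dict, List, Any
--
-- def _infer_column_meaning(col_name: str, col_type: str, analysis: Dict[str, Any]) -> str:
--     """Infer what a column represents based on its name and type."""
--     col_lower = col_name.lower()
--
--     # Common column name patterns
--     if any(x in col_lower for x in ["id", "key", "code"]):
--         return "Unique identifier or code"
--     elif any(x in col_lower for x in ["name", "title"]):
--         return "Name or title"
--     elif any(x in col_lower for x in ["date", "time", "created", "updated"]):
--         return "Date or timestamp"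
--     elif any(x in col_lower for x in ["price", "cost", "amount", "value", "revenue", "salary"]):
--         return "Monetary value or price"
--     elif any(x in col_lower for x in ["count", "quantity", "number", "total"]):
--         return "Count or quantity"
--     elif any(x in col_lower for x in ["email", "mail"]):
--         return "Email address"
--     elif any(x in col_lower for x in ["phone", "tel", "mobile"]):
--         return "Phone number"
--     elif any(x in col_lower for x in ["address", "street", "location"]):
--         return "Address or location"
--     elif any(x in col_lower for x in ["city", "town"]):
--         return "City name"
--     elif any(x in col_lower for x in ["country", "nation"]):
--         return "Country name"
--     elif any(x in col_lower for x in ["state", "province", "region"]):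
--         return "State or region"
--     elif any(x in col_lower for x in ["category", "type", "class"]):
--         return "Category or classification"
--     elif any(x in col_lower for x in ["status", "state"]):
--         return "Status indicator"
--     elif any(x in col_lower for x in ["description", "notes", "comment"]):
--         return "Descriptive text or notes"
--     elif col_type == "numeric":
--         return "Numeric measurement or value"
--     else:
--         return "Text or categorical data"
-- ===== SOURCE B (Python) =====
-- from typing import Dict, List, Any
--
-- # Flat (keyword, rank) table; rank = priority group index into _LABELS.
-- # 'state' keeps only its first (lower, "State or region") rank: in the original
-- # cascade the later status group can only ever fire via 'status'.
-- _KEYWORDS = [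
--     ("id", 0), ("key", 0), ("code", 0),
--     ("name", 1), ("title", 1),
--     ("date", 2), ("time", 2), ("created", 2), ("updated", 2),
--     ("price", 3), ("cost", 3), ("amount", 3), ("value", 3), ("revenue", 3), ("salary", 3),
--     ("count", 4), ("quantity", 4), ("number", 4), ("total", 4),
--     ("email", 5), ("mail", 5),
--     ("phone", 6), ("tel", 6), ("mobile", 6),
--     ("address", 7), ("street", 7), ("location", 7),
--     ("city", 8), ("town", 8),
--     ("country", 9), ("nation", 9),
--     ("state", 10), ("province", 10), ("region", 10),
--     ("category", 11), ("type", 11), ("class", 11),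
--     ("status", 12),
--     ("description", 13), ("notes", 13), ("comment", 13),
-- ]
--
-- _LABELS = [
--     "Unique identifier or code",
--     "Name or title",
--     "Date or timestamp",
--     "Monetary value or price",
--     "Count or quantity",
--     "Email address",
--     "Phone number",
--     "Address or location",
--     "City name",
--     "Country name",
--     "State or region",
--     "Category or classification",
--     "Status indicator",
--     "Descriptive text or notes",
-- ]
--
--
-- def _infer_column_meaning(col_name: str, col_type: str, analysis: Dict[str, Any]) -> str:
--     """Infer what a column represents based on its name and type.
--
--     Single left-to-right scan over the column name: at each position, try every
--     keyword as a prefix and keep the best (lowest) rank seen; decode at the end.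
--     """
--     col_lower = col_name.lower()
--     best = len(_LABELS)  # sentinel: nothing matched yet
--     for j in range(len(col_lower)):
--         for keyword, rank in _KEYWORDS:
--             if rank < best and col_lower.startswith(keyword, j):
--                 best = rank
--     if best < len(_LABELS):
--         return _LABELS[best]
--     return "Numeric measurement or value" if col_type == "numeric" else "Text or categorical data"
-- ===== Notes on version B (the rewrite author's own statement) =====
-- stated objective: alternative
-- what changed: Replaces the 14-branch if/elif cascade of any(keyword in name) substring searches by a single left-to-right scan of the column name that tries every keyword as a prefix at each position, keeps the minimum rank seen, and decodes the winner through a label table at the end.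
import Mathlib
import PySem

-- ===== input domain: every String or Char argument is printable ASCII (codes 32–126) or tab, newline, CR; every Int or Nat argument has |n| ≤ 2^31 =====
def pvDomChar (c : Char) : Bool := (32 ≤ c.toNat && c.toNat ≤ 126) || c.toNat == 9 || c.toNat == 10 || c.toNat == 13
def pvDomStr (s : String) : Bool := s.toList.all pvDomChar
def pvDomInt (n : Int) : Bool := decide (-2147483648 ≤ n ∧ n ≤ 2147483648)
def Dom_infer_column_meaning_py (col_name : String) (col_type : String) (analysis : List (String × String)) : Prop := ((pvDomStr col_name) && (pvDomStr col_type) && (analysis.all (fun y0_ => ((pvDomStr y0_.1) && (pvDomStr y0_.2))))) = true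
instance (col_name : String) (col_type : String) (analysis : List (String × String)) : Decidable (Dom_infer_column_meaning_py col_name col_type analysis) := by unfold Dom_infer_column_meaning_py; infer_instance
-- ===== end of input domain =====

set_option maxRecDepth 8192


-- B replaces A's cascade of substring searches by a single left-to-right scan of the
-- column name that keeps the best (lowest) rank of any keyword seen as a prefix at
-- any position, decoded through a label table at the end (alternative algorithm).

-- ===== PORT A =====
-- Port of A: literal cascade of any(x in col_lower ...) membership tests.
def infer_column_meaning_py (col_name : String) (col_type : String) (analysis : List (String × String)) : String :=
  let col_lower := PySem.Str.lower col_name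
  if ["id", "key", "code"].any (fun x => PySem.Str.isIn x col_lower) then
    "Unique identifier or code"
  else if ["name", "title"].any (fun x => PySem.Str.isIn x col_lower) then
    "Name or title"
  else if ["date", "time", "created", "updated"].any (fun x => PySem.Str.isIn x col_lower) then
    "Date or timestamp"
  else if ["price", "cost", "amount", "value", "revenue", "salary"].any (fun x => PySem.Str.isIn x col_lower) then
    "Monetary value or price"
  else if ["count", "quantity", "number", "total"].any (fun x => PySem.Str.isIn x col_lower) then
    "Count or quantity"
  else if ["email", "mail"].any (fun x => PySem.Str.isIn x col_lower) then
    "Email address"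
  else if ["phone", "tel", "mobile"].any (fun x => PySem.Str.isIn x col_lower) then
    "Phone number"
  else if ["address", "street", "location"].any (fun x => PySem.Str.isIn x col_lower) then
    "Address or location"
  else if ["city", "town"].any (fun x => PySem.Str.isIn x col_lower) then
    "City name"
  else if ["country", "nation"].any (fun x => PySem.Str.isIn x col_lower) then
    "Country name"
  else if ["state", "province", "region"].any (fun x => PySem.Str.isIn x col_lower) then
    "State or region"
  else if ["category", "type", "class"].any (fun x => PySem.Str.isIn x col_lower) then
    "Category or classification"
  else if ["status", "state"].any (fun x => PySem.Str.isIn x col_lower) then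
    "Status indicator"
  else if ["description", "notes", "comment"].any (fun x => PySem.Str.isIn x col_lower) then
    "Descriptive text or notes"
  else if col_type == "numeric" then
    "Numeric measurement or value"
  else
    "Text or categorical data"

-- ===== PORT B =====
-- flat (keyword, rank) table ('state' keeps only its first, lower rank, as in Source B)
def pvKeywords : List (String × Nat) :=
  [ ("id", 0), ("key", 0), ("code", 0),
    ("name", 1), ("title", 1),
    ("date", 2), ("time", 2), ("created", 2), ("updated", 2),
    ("price", 3), ("cost", 3), ("amount", 3), ("value", 3), ("revenue", 3), ("salary", 3),
    ("count", 4), ("quantity", 4), ("number", 4), ("total", 4),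
    ("email", 5), ("mail", 5),
    ("phone", 6), ("tel", 6), ("mobile", 6),
    ("address", 7), ("street", 7), ("location", 7),
    ("city", 8), ("town", 8),
    ("country", 9), ("nation", 9),
    ("state", 10), ("province", 10), ("region", 10),
    ("category", 11), ("type", 11), ("class", 11),
    ("status", 12),
    ("description", 13), ("notes", 13), ("comment", 13) ]

def pvLabels : List String :=
  [ "Unique identifier or code",
    "Name or title",
    "Date or timestamp",
    "Monetary value or price",
    "Count or quantity",
    "Email address",
    "Phone number",
    "Address or location",
    "City name",
    "Country name",
    "State or region",
    "Category or classification",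
    "Status indicator",
    "Descriptive text or notes" ]

-- col_lower.startswith(keyword, j) for 0 ≤ j: exact as a prefix test on the j-th suffix
def pvSw (cl : List Char) (j : Nat) (p : String × Nat) : Bool :=
  PySem.Chars.startswith (cl.drop j) p.1.toList

-- 'if rank < best and col_lower.startswith(keyword, j): best = rank'
def pvStep (cl : List Char) (j : Nat) (b : Nat) (p : String × Nat) : Nat :=
  if p.2 < b && pvSw cl j p then p.2 else b

-- the inner 'for keyword, rank in _KEYWORDS' loop
def pvScanPos (cl : List Char) (b : Nat) (j : Nat) : Nat :=
  pvKeywords.foldl (pvStep cl j) b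

-- the outer 'for j in range(len(col_lower))' loop, best initialised to len(_LABELS) = 14
def pvBest (cl : List Char) : Nat :=
  (List.range cl.length).foldl (pvScanPos cl) 14

def infer_column_meaning_py_alt (col_name : String) (col_type : String) (analysis : List (String × String)) : String :=
  let cl := (PySem.Str.lower col_name).toList
  let best := pvBest cl
  if best < pvLabels.length then pvLabels.getD best ""  -- _LABELS[best]; exact: the guard gives best < 14
  else if col_type == "numeric" then "Numeric measurement or value"
  else "Text or categorical data"

-- ===== PRECONDITION & SPEC =====
def Spec_infer_column_meaning_py (col_name : String) (col_type : String) (analysis : List (String × String)) (out : String) : Prop := out = infer_column_meaning_py_alt col_name col_type analysis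
instance (col_name : String) (col_type : String) (analysis : List (String × String)) (out : String) : Decidable (Spec_infer_column_meaning_py col_name col_type analysis out) := by unfold Spec_infer_column_meaning_py; infer_instance

-- ===== CLAIM (what is proved, stated in full; the proofs are below) =====
def Claim_equal_infer_column_meaning_py : Prop := ∀ (col_name : String) (col_type : String) (analysis : List (String × String)), Dom_infer_column_meaning_py col_name col_type analysis → Spec_infer_column_meaning_py col_name col_type analysis (infer_column_meaning_py col_name col_type analysis)

-- ===== LEMMAS AND PROOFS =====

-- 'group g matched somewhere in the scan'
def pvM (cl : List Char) (g : Nat) : Prop :=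
  ∃ j, j < cl.length ∧ ∃ p ∈ pvKeywords, p.2 = g ∧ pvSw cl j p = true

-- invariant of the inner keyword loop
theorem pv_inner_inv (cl : List Char) (j : Nat) (ks : List (String × Nat)) (b : Nat) :
    ks.foldl (pvStep cl j) b ≤ b ∧
    (ks.foldl (pvStep cl j) b = b ∨ ∃ p ∈ ks, p.2 = ks.foldl (pvStep cl j) b ∧ pvSw cl j p = true) ∧
    (∀ p ∈ ks, pvSw cl j p = true → ks.foldl (pvStep cl j) b ≤ p.2) := by
  induction ks generalizing b with
  | nil => simp
  | cons p ks ih =>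
    obtain ⟨ih1, ih2, ih3⟩ := ih (pvStep cl j b p)
    have hle : pvStep cl j b p ≤ b := by unfold pvStep; split_ifs <;> simp_all <;> omega
    have hcase : pvStep cl j b p = b ∨ (p.2 = pvStep cl j b p ∧ pvSw cl j p = true) := by
      unfold pvStep; split_ifs with h
      · simp only [Bool.and_eq_true, decide_eq_true_eq] at h; exact Or.inr ⟨rfl, h.2⟩
      · exact Or.inl rfl
    have hswle : pvSw cl j p = true → pvStep cl j b p ≤ p.2 := by
      intro hsw; unfold pvStep; split_ifs with h
      · exact le_refl _
      · simp only [hsw, Bool.and_true, decide_eq_true_eq] at h; omega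
    refine ⟨le_trans ih1 hle, ?_, ?_⟩
    · rcases ih2 with h | ⟨q, hq, hq2, hq3⟩
      · rw [List.foldl_cons, h]
        rcases hcase with h' | ⟨h1, h2⟩
        · exact Or.inl h'
        · exact Or.inr ⟨p, List.mem_cons_self, h1.symm ▸ rfl, h2⟩
      · exact Or.inr ⟨q, List.mem_cons_of_mem _ hq, hq2, hq3⟩
    · intro q hq hsw
      rcases List.mem_cons.mp hq with rfl | hq'
      · exact le_trans ih1 (hswle hsw)
      · exact ih3 q hq' hsw

-- invariant of the outer position loop
set_option maxHeartbeats 2000000 in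
theorem pv_outer_inv (cl : List Char) (js : List Nat) (b : Nat) :
    js.foldl (pvScanPos cl) b ≤ b ∧
    (js.foldl (pvScanPos cl) b = b ∨
      ∃ j ∈ js, ∃ p ∈ pvKeywords, p.2 = js.foldl (pvScanPos cl) b ∧ pvSw cl j p = true) ∧
    (∀ j ∈ js, ∀ p ∈ pvKeywords, pvSw cl j p = true → js.foldl (pvScanPos cl) b ≤ p.2) := by
  induction js generalizing b with
  | nil => simp
  | cons j js ih =>
    obtain ⟨ih1, ih2, ih3⟩ := ih (pvScanPos cl b j)
    have hinner := pv_inner_inv cl j pvKeywords b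
    rw [show pvKeywords.foldl (pvStep cl j) b = pvScanPos cl b j from rfl] at hinner
    obtain ⟨h1, h2, h3⟩ := hinner
    rw [List.foldl_cons]
    refine ⟨le_trans ih1 h1, ?_, ?_⟩
    · rcases ih2 with h | ⟨j', hj', q, hq, hq2, hq3⟩
      · rw [h]
        rcases h2 with h' | ⟨q, hq, hq2, hq3⟩
        · exact Or.inl h'
        · exact Or.inr ⟨j, List.mem_cons_self, q, hq, hq2, hq3⟩
      · exact Or.inr ⟨j', List.mem_cons_of_mem _ hj', q, hq, hq2, hq3⟩
    · intro j' hj' q hq hsw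
      rcases List.mem_cons.mp hj' with rfl | hj''
      · exact le_trans ih1 (h3 q hq hsw)
      · exact ih3 j' hj'' q hq hsw

set_option maxHeartbeats 2000000 in
theorem pv_rank_lt : ∀ p ∈ pvKeywords, p.2 < 14 := by decide

theorem pvM_lt (cl : List Char) (g : Nat) (h : pvM cl g) : g < 14 := by
  obtain ⟨_, _, p, hp, hpg, _⟩ := h
  exact hpg ▸ pv_rank_lt p hp

theorem pvBest_le_of_M (cl : List Char) (g : Nat) (h : pvM cl g) : pvBest cl ≤ g := by
  obtain ⟨j, hj, p, hp, hpg, hsw⟩ := h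
  have := (pv_outer_inv cl (List.range cl.length) 14).2.2 j (List.mem_range.mpr hj) p hp hsw
  unfold pvBest
  omega

theorem pvBest_cases (cl : List Char) : pvBest cl = 14 ∨ pvM cl (pvBest cl) := by
  rcases (pv_outer_inv cl (List.range cl.length) 14).2.1 with h | ⟨j, hj, p, hp, hpg, hsw⟩
  · exact Or.inl h
  · exact Or.inr ⟨j, List.mem_range.mp hj, p, hp, hpg, hsw⟩

theorem pvBest_least (cl : List Char) (g : Nat) (hg : pvM cl g)
    (hmin : ∀ g', g' < g → ¬ pvM cl g') : pvBest cl = g := by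
  have h1 := pvBest_le_of_M cl g hg
  have h2 := pvM_lt cl g hg
  rcases pvBest_cases cl with h | h
  · omega
  · by_contra hne
    exact hmin _ (by omega) h

theorem pvBest_none (cl : List Char) (h : ∀ g, ¬ pvM cl g) : pvBest cl = 14 := by
  rcases pvBest_cases cl with h' | h'
  · exact h'
  · exact absurd h' (h _)

-- bounded suffix-prefix occurrence ↔ Python's 'sub in s'
theorem pv_occurs_iff (k : String) (hk : k.toList ≠ []) (cl : List Char) :
    (∃ j, j < cl.length ∧ PySem.Chars.startswith (cl.drop j) k.toList = true) ↔
      PySem.Chars.isIn k.toList cl = true := by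
  rw [← PySem.Chars.exists_prefix_drop_iff_isIn]
  constructor
  · rintro ⟨j, _, hsw⟩
    exact ⟨j, (PySem.Chars.startswith_iff _ _).mp hsw⟩
  · rintro ⟨j, hpre⟩
    refine ⟨j, ?_, (PySem.Chars.startswith_iff _ _).mpr hpre⟩
    by_contra hle
    rw [List.drop_eq_nil_of_le (by omega)] at hpre
    exact hk (List.prefix_nil.mp hpre)

-- forward half without the nonemptiness hypothesis
theorem pv_occurs_mp (k : String) (cl : List Char) (j : Nat)
    (hsw : PySem.Chars.startswith (cl.drop j) k.toList = true) :
    PySem.Chars.isIn k.toList cl = true := by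
  rw [← PySem.Chars.exists_prefix_drop_iff_isIn]
  exact ⟨j, (PySem.Chars.startswith_iff _ _).mp hsw⟩

theorem pvM_iff (s : String) (g : Nat) (kws : List String)
    (hfwd : ∀ p ∈ pvKeywords, p.2 = g → p.1 ∈ kws)
    (hbwd : ∀ k ∈ kws, (k, g) ∈ pvKeywords ∧ k.toList ≠ []) :
    pvM s.toList g ↔ (kws.any (fun x => PySem.Str.isIn x s)) = true := by
  rw [List.any_eq_true]
  constructor
  · rintro ⟨j, hj, p, hp, hpg, hsw⟩
    refine ⟨p.1, hfwd p hp hpg, ?_⟩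
    have := pv_occurs_mp p.1 s.toList j hsw
    simpa [PySem.Str.isIn] using this
  · rintro ⟨k, hk, hin⟩
    obtain ⟨hmem, hne⟩ := hbwd k hk
    have hin' : PySem.Chars.isIn k.toList s.toList = true := by
      simpa [PySem.Str.isIn] using hin
    obtain ⟨j, hj, hsw⟩ := (pv_occurs_iff k hne s.toList).mpr hin'
    exact ⟨j, hj, (k, g), hmem, rfl, hsw⟩

theorem pvM_iff_0 (s : String) : pvM s.toList 0 ↔ (["id", "key", "code"].any (fun x => PySem.Str.isIn x s)) = true := pvM_iff s 0 _ (by decide) (by decide)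
theorem pvM_iff_1 (s : String) : pvM s.toList 1 ↔ (["name", "title"].any (fun x => PySem.Str.isIn x s)) = true := pvM_iff s 1 _ (by decide) (by decide)
theorem pvM_iff_2 (s : String) : pvM s.toList 2 ↔ (["date", "time", "created", "updated"].any (fun x => PySem.Str.isIn x s)) = true := pvM_iff s 2 _ (by decide) (by decide)
theorem pvM_iff_3 (s : String) : pvM s.toList 3 ↔ (["price", "cost", "amount", "value", "revenue", "salary"].any (fun x => PySem.Str.isIn x s)) = true := pvM_iff s 3 _ (by decide) (by decide)
theorem pvM_iff_4 (s : String) : pvM s.toList 4 ↔ (["count", "quantity", "number", "total"].any (fun x => PySem.Str.isIn x s)) = true := pvM_iff s 4 _ (by decide) (by decide)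
theorem pvM_iff_5 (s : String) : pvM s.toList 5 ↔ (["email", "mail"].any (fun x => PySem.Str.isIn x s)) = true := pvM_iff s 5 _ (by decide) (by decide)
theorem pvM_iff_6 (s : String) : pvM s.toList 6 ↔ (["phone", "tel", "mobile"].any (fun x => PySem.Str.isIn x s)) = true := pvM_iff s 6 _ (by decide) (by decide)
theorem pvM_iff_7 (s : String) : pvM s.toList 7 ↔ (["address", "street", "location"].any (fun x => PySem.Str.isIn x s)) = true := pvM_iff s 7 _ (by decide) (by decide)
theorem pvM_iff_8 (s : String) : pvM s.toList 8 ↔ (["city", "town"].any (fun x => PySem.Str.isIn x s)) = true := pvM_iff s 8 _ (by decide) (by decide)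
theorem pvM_iff_9 (s : String) : pvM s.toList 9 ↔ (["country", "nation"].any (fun x => PySem.Str.isIn x s)) = true := pvM_iff s 9 _ (by decide) (by decide)
theorem pvM_iff_10 (s : String) : pvM s.toList 10 ↔ (["state", "province", "region"].any (fun x => PySem.Str.isIn x s)) = true := pvM_iff s 10 _ (by decide) (by decide)
theorem pvM_iff_11 (s : String) : pvM s.toList 11 ↔ (["category", "type", "class"].any (fun x => PySem.Str.isIn x s)) = true := pvM_iff s 11 _ (by decide) (by decide)
theorem pvM_iff_12 (s : String) : pvM s.toList 12 ↔ (["status"].any (fun x => PySem.Str.isIn x s)) = true := pvM_iff s 12 _ (by decide) (by decide)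
theorem pvM_iff_13 (s : String) : pvM s.toList 13 ↔ (["description", "notes", "comment"].any (fun x => PySem.Str.isIn x s)) = true := pvM_iff s 13 _ (by decide) (by decide)

-- A's 13th condition any(["status","state"]) collapses to 'status' once groups 0–12 failed:
-- a hit on 'state' already fired the rank-10 group.
theorem pv_cond12 (s : String) (h10 : ¬ (["state", "province", "region"].any (fun x => PySem.Str.isIn x s)) = true) :
    (["status", "state"].any (fun x => PySem.Str.isIn x s)) = (["status"].any (fun x => PySem.Str.isIn x s)) := by
  have hst : PySem.Str.isIn "state" s = false := by
    cases hEq : PySem.Str.isIn "state" s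
    · rfl
    · exact absurd (by rw [List.any_eq_true]; exact ⟨"state", by simp, hEq⟩) h10
  simp only [List.any, Bool.or_false]
  rw [hst]
  simp

-- ===== VERDICT (by name: the statement is the Claim_ definition above) =====
set_option maxHeartbeats 2000000 in
theorem infer_column_meaning_py_spec : Claim_equal_infer_column_meaning_py := by
  intro col_name col_type analysis _
  unfold Spec_infer_column_meaning_py infer_column_meaning_py infer_column_meaning_py_alt
  simp only []
  generalize PySem.Str.lower col_name = s
  by_cases h0 : (["id", "key", "code"].any (fun x => PySem.Str.isIn x s)) = true
  · have hb : pvBest s.toList = 0 := pvBest_least _ 0 ((pvM_iff_0 s).mpr h0) (by omega)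
    rw [if_pos h0, hb]
    simp [pvLabels]
  ·
    by_cases h1 : (["name", "title"].any (fun x => PySem.Str.isIn x s)) = true
    · have hb : pvBest s.toList = 1 := pvBest_least _ 1 ((pvM_iff_1 s).mpr h1) (by
        intro g' hg'; interval_cases g'; exacts [fun hM => h0 ((pvM_iff_0 s).mp hM)])
      rw [if_neg h0, if_pos h1, hb]
      simp [pvLabels]
    ·
      by_cases h2 : (["date", "time", "created", "updated"].any (fun x => PySem.Str.isIn x s)) = true
      · have hb : pvBest s.toList = 2 := pvBest_least _ 2 ((pvM_iff_2 s).mpr h2) (by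
          intro g' hg'; interval_cases g'; exacts [fun hM => h0 ((pvM_iff_0 s).mp hM), fun hM => h1 ((pvM_iff_1 s).mp hM)])
        rw [if_neg h0, if_neg h1, if_pos h2, hb]
        simp [pvLabels]
      ·
        by_cases h3 : (["price", "cost", "amount", "value", "revenue", "salary"].any (fun x => PySem.Str.isIn x s)) = true
        · have hb : pvBest s.toList = 3 := pvBest_least _ 3 ((pvM_iff_3 s).mpr h3) (by
            intro g' hg'; interval_cases g'; exacts [fun hM => h0 ((pvM_iff_0 s).mp hM), fun hM => h1 ((pvM_iff_1 s).mp hM), fun hM => h2 ((pvM_iff_2 s).mp hM)])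
          rw [if_neg h0, if_neg h1, if_neg h2, if_pos h3, hb]
          simp [pvLabels]
        ·
          by_cases h4 : (["count", "quantity", "number", "total"].any (fun x => PySem.Str.isIn x s)) = true
          · have hb : pvBest s.toList = 4 := pvBest_least _ 4 ((pvM_iff_4 s).mpr h4) (by
              intro g' hg'; interval_cases g'; exacts [fun hM => h0 ((pvM_iff_0 s).mp hM), fun hM => h1 ((pvM_iff_1 s).mp hM), fun hM => h2 ((pvM_iff_2 s).mp hM), fun hM => h3 ((pvM_iff_3 s).mp hM)])
            rw [if_neg h0, if_neg h1, if_neg h2, if_neg h3, if_pos h4, hb]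
            simp [pvLabels]
          ·
            by_cases h5 : (["email", "mail"].any (fun x => PySem.Str.isIn x s)) = true
            · have hb : pvBest s.toList = 5 := pvBest_least _ 5 ((pvM_iff_5 s).mpr h5) (by
                intro g' hg'; interval_cases g'; exacts [fun hM => h0 ((pvM_iff_0 s).mp hM), fun hM => h1 ((pvM_iff_1 s).mp hM), fun hM => h2 ((pvM_iff_2 s).mp hM), fun hM => h3 ((pvM_iff_3 s).mp hM), fun hM => h4 ((pvM_iff_4 s).mp hM)])
              rw [if_neg h0, if_neg h1, if_neg h2, if_neg h3, if_neg h4, if_pos h5, hb]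
              simp [pvLabels]
            ·
              by_cases h6 : (["phone", "tel", "mobile"].any (fun x => PySem.Str.isIn x s)) = true
              · have hb : pvBest s.toList = 6 := pvBest_least _ 6 ((pvM_iff_6 s).mpr h6) (by
                  intro g' hg'; interval_cases g'; exacts [fun hM => h0 ((pvM_iff_0 s).mp hM), fun hM => h1 ((pvM_iff_1 s).mp hM), fun hM => h2 ((pvM_iff_2 s).mp hM), fun hM => h3 ((pvM_iff_3 s).mp hM), fun hM => h4 ((pvM_iff_4 s).mp hM), fun hM => h5 ((pvM_iff_5 s).mp hM)])
                rw [if_neg h0, if_neg h1, if_neg h2, if_neg h3, if_neg h4, if_neg h5, if_pos h6, hb]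
                simp [pvLabels]
              ·
                by_cases h7 : (["address", "street", "location"].any (fun x => PySem.Str.isIn x s)) = true
                · have hb : pvBest s.toList = 7 := pvBest_least _ 7 ((pvM_iff_7 s).mpr h7) (by
                    intro g' hg'; interval_cases g'; exacts [fun hM => h0 ((pvM_iff_0 s).mp hM), fun hM => h1 ((pvM_iff_1 s).mp hM), fun hM => h2 ((pvM_iff_2 s).mp hM), fun hM => h3 ((pvM_iff_3 s).mp hM), fun hM => h4 ((pvM_iff_4 s).mp hM), fun hM => h5 ((pvM_iff_5 s).mp hM), fun hM => h6 ((pvM_iff_6 s).mp hM)])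
                  rw [if_neg h0, if_neg h1, if_neg h2, if_neg h3, if_neg h4, if_neg h5, if_neg h6, if_pos h7, hb]
                  simp [pvLabels]
                ·
                  by_cases h8 : (["city", "town"].any (fun x => PySem.Str.isIn x s)) = true
                  · have hb : pvBest s.toList = 8 := pvBest_least _ 8 ((pvM_iff_8 s).mpr h8) (by
                      intro g' hg'; interval_cases g'; exacts [fun hM => h0 ((pvM_iff_0 s).mp hM), fun hM => h1 ((pvM_iff_1 s).mp hM), fun hM => h2 ((pvM_iff_2 s).mp hM), fun hM => h3 ((pvM_iff_3 s).mp hM), fun hM => h4 ((pvM_iff_4 s).mp hM), fun hM => h5 ((pvM_iff_5 s).mp hM), fun hM => h6 ((pvM_iff_6 s).mp hM), fun hM => h7 ((pvM_iff_7 s).mp hM)])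
                    rw [if_neg h0, if_neg h1, if_neg h2, if_neg h3, if_neg h4, if_neg h5, if_neg h6, if_neg h7, if_pos h8, hb]
                    simp [pvLabels]
                  ·
                    by_cases h9 : (["country", "nation"].any (fun x => PySem.Str.isIn x s)) = true
                    · have hb : pvBest s.toList = 9 := pvBest_least _ 9 ((pvM_iff_9 s).mpr h9) (by
                        intro g' hg'; interval_cases g'; exacts [fun hM => h0 ((pvM_iff_0 s).mp hM), fun hM => h1 ((pvM_iff_1 s).mp hM), fun hM => h2 ((pvM_iff_2 s).mp hM), fun hM => h3 ((pvM_iff_3 s).mp hM), fun hM => h4 ((pvM_iff_4 s).mp hM), fun hM => h5 ((pvM_iff_5 s).mp hM), fun hM => h6 ((pvM_iff_6 s).mp hM), fun hM => h7 ((pvM_iff_7 s).mp hM), fun hM => h8 ((pvM_iff_8 s).mp hM)])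
                      rw [if_neg h0, if_neg h1, if_neg h2, if_neg h3, if_neg h4, if_neg h5, if_neg h6, if_neg h7, if_neg h8, if_pos h9, hb]
                      simp [pvLabels]
                    ·
                      by_cases h10 : (["state", "province", "region"].any (fun x => PySem.Str.isIn x s)) = true
                      · have hb : pvBest s.toList = 10 := pvBest_least _ 10 ((pvM_iff_10 s).mpr h10) (by
                          intro g' hg'; interval_cases g'; exacts [fun hM => h0 ((pvM_iff_0 s).mp hM), fun hM => h1 ((pvM_iff_1 s).mp hM), fun hM => h2 ((pvM_iff_2 s).mp hM), fun hM => h3 ((pvM_iff_3 s).mp hM), fun hM => h4 ((pvM_iff_4 s).mp hM), fun hM => h5 ((pvM_iff_5 s).mp hM), fun hM => h6 ((pvM_iff_6 s).mp hM), fun hM => h7 ((pvM_iff_7 s).mp hM), fun hM => h8 ((pvM_iff_8 s).mp hM), fun hM => h9 ((pvM_iff_9 s).mp hM)])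
                        rw [if_neg h0, if_neg h1, if_neg h2, if_neg h3, if_neg h4, if_neg h5, if_neg h6, if_neg h7, if_neg h8, if_neg h9, if_pos h10, hb]
                        simp [pvLabels]
                      ·
                        by_cases h11 : (["category", "type", "class"].any (fun x => PySem.Str.isIn x s)) = true
                        · have hb : pvBest s.toList = 11 := pvBest_least _ 11 ((pvM_iff_11 s).mpr h11) (by
                            intro g' hg'; interval_cases g'; exacts [fun hM => h0 ((pvM_iff_0 s).mp hM), fun hM => h1 ((pvM_iff_1 s).mp hM), fun hM => h2 ((pvM_iff_2 s).mp hM), fun hM => h3 ((pvM_iff_3 s).mp hM), fun hM => h4 ((pvM_iff_4 s).mp hM), fun hM => h5 ((pvM_iff_5 s).mp hM), fun hM => h6 ((pvM_iff_6 s).mp hM), fun hM => h7 ((pvM_iff_7 s).mp hM), fun hM => h8 ((pvM_iff_8 s).mp hM), fun hM => h9 ((pvM_iff_9 s).mp hM), fun hM => h10 ((pvM_iff_10 s).mp hM)])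
                          rw [if_neg h0, if_neg h1, if_neg h2, if_neg h3, if_neg h4, if_neg h5, if_neg h6, if_neg h7, if_neg h8, if_neg h9, if_neg h10, if_pos h11, hb]
                          simp [pvLabels]
                        ·
                          by_cases h12 : (["status", "state"].any (fun x => PySem.Str.isIn x s)) = true
                          · have hb : pvBest s.toList = 12 := pvBest_least _ 12 ((pvM_iff_12 s).mpr ((pv_cond12 s h10) ▸ h12)) (by
                              intro g' hg'; interval_cases g'; exacts [fun hM => h0 ((pvM_iff_0 s).mp hM), fun hM => h1 ((pvM_iff_1 s).mp hM), fun hM => h2 ((pvM_iff_2 s).mp hM), fun hM => h3 ((pvM_iff_3 s).mp hM), fun hM => h4 ((pvM_iff_4 s).mp hM), fun hM => h5 ((pvM_iff_5 s).mp hM), fun hM => h6 ((pvM_iff_6 s).mp hM), fun hM => h7 ((pvM_iff_7 s).mp hM), fun hM => h8 ((pvM_iff_8 s).mp hM), fun hM => h9 ((pvM_iff_9 s).mp hM), fun hM => h10 ((pvM_iff_10 s).mp hM), fun hM => h11 ((pvM_iff_11 s).mp hM)])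
                            rw [if_neg h0, if_neg h1, if_neg h2, if_neg h3, if_neg h4, if_neg h5, if_neg h6, if_neg h7, if_neg h8, if_neg h9, if_neg h10, if_neg h11, if_pos h12, hb]
                            simp [pvLabels]
                          ·
                            have h12' := h12
                            rw [pv_cond12 s h10] at h12'
                            by_cases h13 : (["description", "notes", "comment"].any (fun x => PySem.Str.isIn x s)) = true
                            · have hb : pvBest s.toList = 13 := pvBest_least _ 13 ((pvM_iff_13 s).mpr h13) (by
                                intro g' hg'; interval_cases g'; exacts [fun hM => h0 ((pvM_iff_0 s).mp hM), fun hM => h1 ((pvM_iff_1 s).mp hM), fun hM => h2 ((pvM_iff_2 s).mp hM), fun hM => h3 ((pvM_iff_3 s).mp hM), fun hM => h4 ((pvM_iff_4 s).mp hM), fun hM => h5 ((pvM_iff_5 s).mp hM), fun hM => h6 ((pvM_iff_6 s).mp hM), fun hM => h7 ((pvM_iff_7 s).mp hM), fun hM => h8 ((pvM_iff_8 s).mp hM), fun hM => h9 ((pvM_iff_9 s).mp hM), fun hM => h10 ((pvM_iff_10 s).mp hM), fun hM => h11 ((pvM_iff_11 s).mp hM), fun hM => h12' ((pvM_iff_12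 s).mp hM)])
                              rw [if_neg h0, if_neg h1, if_neg h2, if_neg h3, if_neg h4, if_neg h5, if_neg h6, if_neg h7, if_neg h8, if_neg h9, if_neg h10, if_neg h11, if_neg h12, if_pos h13, hb]
                              simp [pvLabels]
                            ·
                              have hb : pvBest s.toList = 14 := pvBest_none _ (by
                                intro g hM
                                have hg := pvM_lt _ _ hM
                                interval_cases g
                                · exact h0 ((pvM_iff_0 s).mp hM)
                                · exact h1 ((pvM_iff_1 s).mp hM)
                                · exact h2 ((pvM_iff_2 s).mp hM)
                                · exact h3 ((pvM_iff_3 s).mp hM)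
                                · exact h4 ((pvM_iff_4 s).mp hM)
                                · exact h5 ((pvM_iff_5 s).mp hM)
                                · exact h6 ((pvM_iff_6 s).mp hM)
                                · exact h7 ((pvM_iff_7 s).mp hM)
                                · exact h8 ((pvM_iff_8 s).mp hM)
                                · exact h9 ((pvM_iff_9 s).mp hM)
                                · exact h10 ((pvM_iff_10 s).mp hM)
                                · exact h11 ((pvM_iff_11 s).mp hM)
                                · exact h12' ((pvM_iff_12 s).mp hM)
                                · exact h13 ((pvM_iff_13 s).mp hM)
                                )
                              rw [if_neg h0, if_neg h1, if_neg h2, if_neg h3, if_neg h4, if_neg h5, if_neg h6, if_neg h7, if_neg h8, if_neg h9, if_neg h10, if_neg h11, if_neg h12, if_neg h13, hb]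
                              simp [pvLabels]
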